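-- pv_equiv track=rewrite | github.com/CherylYul/algorithm | prefix-sum/mushroom-picker.py | solution
-- ===== SOURCE A (Python) =====
-- def prefix_sums(A):
--     n = len(A)
--     P = [0] * (n + 1)
--     for k in range(1, n + 1):
--         P[k] = P[k - 1] + A[k - 1]
--     return P
--
-- def solution(A, k, m):
--     n = len(A)
--     result = 0
--     pref = prefix_sums(A)
--     for p in range(min(m, k) + 1):
--         left_pos = k - p
--         right_pos = min(n, max(k, k + m - 2 * p))
--         result = max(result, pref[right_pos] - pref[left_pos])
--     for p in range(min(m + 1, n - k)):
--         right_pos = k + p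
--         left_pos = max(0, min(k, k - (m - 2 * p)))
--         result = max(result, pref[right_pos] - pref[left_pos])
--     return result
-- ===== SOURCE B (Python) =====
-- def solution(A, k, m):
--     n = len(A)
--     result = 0
--     for p in range(min(m, k) + 1):
--         left_pos = k - p
--         right_pos = min(n, max(k, k + m - 2 * p))
--         result = max(result, sum(A[left_pos:right_pos]))
--     for p in range(min(m + 1, n - k)):
--         right_pos = k + p
--         left_pos = max(0, min(k, k - (m - 2 * p)))
--         result = max(result, sum(A[left_pos:right_pos]))
--     return result
-- ===== Notes on version B (the rewrite author's own statement) =====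
-- stated objective: simpler
-- what changed: Drops the prefix_sums helper and the precomputed P table entirely; each candidate window is summed directly with sum(A[left_pos:right_pos]) inside the same two loops.
-- outside the precondition, e.g. on solution([1, 2, 3], -1, 1): A returns 6, B returns 3
import Mathlib
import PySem

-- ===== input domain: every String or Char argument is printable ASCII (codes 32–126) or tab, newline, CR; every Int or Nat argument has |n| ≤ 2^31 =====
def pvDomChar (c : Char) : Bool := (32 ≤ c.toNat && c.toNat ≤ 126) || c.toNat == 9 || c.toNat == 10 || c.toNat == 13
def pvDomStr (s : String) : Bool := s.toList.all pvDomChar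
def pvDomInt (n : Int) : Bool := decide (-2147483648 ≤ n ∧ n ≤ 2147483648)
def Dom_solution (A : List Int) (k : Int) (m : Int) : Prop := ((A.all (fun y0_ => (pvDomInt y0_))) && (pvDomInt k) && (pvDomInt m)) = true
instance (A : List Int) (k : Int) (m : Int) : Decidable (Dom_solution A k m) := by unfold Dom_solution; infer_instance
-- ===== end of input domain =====

-- B drops the prefix-sum table and sums each candidate window directly with a slice sum (simpler; not faster).

-- ===== PORT A =====
-- prefix_sums: P = [0]*(n+1); for k in range(1, n+1): P[k] = P[k-1] + A[k-1].
-- pyGetD/pySetD are exact wherever Python returns; here every index is in range (k runs over 1..n).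
def prefixSumsA (A : List Int) : List Int :=
  (PySem.List.pyRange 1 ((A.length : Int) + 1) 1).foldl
    (fun P kk =>
      PySem.List.pySetD P kk (PySem.List.pyGetD P (kk - 1) 0 + PySem.List.pyGetD A (kk - 1) 0))
    (List.replicate (A.length + 1) 0)

-- pref[i] is ported as pyGetD pref i 0: exact wherever Python's pref[i] returns a value
-- (negative indices wrap); where Python raises IndexError the input is outside Pre_solution.
-- (locals left_pos/right_pos and pref are written inline; n = A.length)
def solution (A : List Int) (k : Int) (m : Int) : Int :=
  (PySem.List.pyRange 0 (min (m + 1) ((A.length : Int) - k)) 1).foldl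
    (fun result p =>
      max result (PySem.List.pyGetD (prefixSumsA A) (k + p) 0 -
                  PySem.List.pyGetD (prefixSumsA A) (max 0 (min k (k - (m - 2 * p)))) 0))
    ((PySem.List.pyRange 0 (min m k + 1) 1).foldl
      (fun result p =>
        max result (PySem.List.pyGetD (prefixSumsA A) (min (A.length : Int) (max k (k + m - 2 * p))) 0 -
                    PySem.List.pyGetD (prefixSumsA A) (k - p) 0)) 0)

-- ===== PORT B =====
-- sum(A[left_pos:right_pos]) is ported as (PySem.List.slice …).sum (exact Python slice semantics).
def solution_alt (A : List Int) (k : Int) (m : Int) : Int :=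
  (PySem.List.pyRange 0 (min (m + 1) ((A.length : Int) - k)) 1).foldl
    (fun result p =>
      max result (PySem.List.slice A (some (max 0 (min k (k - (m - 2 * p))))) (some (k + p))).sum)
    ((PySem.List.pyRange 0 (min m k + 1) 1).foldl
      (fun result p =>
        max result (PySem.List.slice A (some (k - p))
          (some (min (A.length : Int) (max k (k + m - 2 * p))))).sum) 0)

-- ===== PRECONDITION & SPEC =====
-- Pre_ excludes out-of-range picker positions k (with m ≥ 0, so that a loop actually runs), on which
-- A either raises IndexError or returns an accidental value via Python's negative-index wraparound.
def Pre_solution (A : List Int) (k : Int) (m : Int) : Prop :=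
  (0 ≤ k ∧ k ≤ (A.length : Int)) ∨ m < 0
instance (A : List Int) (k : Int) (m : Int) : Decidable (Pre_solution A k m) := by
  unfold Pre_solution; infer_instance

def pvWitness_solution : List Int × Int × Int := ([1, 2, 3], 1, 2)

def Spec_solution (A : List Int) (k : Int) (m : Int) (out : Int) : Prop := out = solution_alt A k m
instance (A : List Int) (k : Int) (m : Int) (out : Int) : Decidable (Spec_solution A k m out) := by
  unfold Spec_solution; infer_instance

-- ===== CLAIM (what is proved, stated in full; the proofs are below) =====
def Claim_equal_solution : Prop := ∀ (A : List Int) (k : Int) (m : Int), Dom_solution A k m → Pre_solution A k m → Spec_solution A k m (solution A k m)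

-- ===== LEMMAS AND PROOFS =====

-- the partially built table after the prefix loop has run for indices 1..j
def prefPartial (A : List Int) (j : Nat) : List Int :=
  (List.range (A.length + 1)).map (fun i => if i ≤ j then ((A.take i).sum : Int) else 0)

theorem foldl_congr_mem' {α β : Type} {l : List α} {f g : β → α → β} {b : β}
    (h : ∀ acc x, x ∈ l → f acc x = g acc x) : l.foldl f b = l.foldl g b := by
  induction l generalizing b with
  | nil => rfl
  | cons x xs ih =>
      simp only [List.foldl_cons]
      rw [h b x (by simp)]
      exact ih (fun acc y hy => h acc y (by simp [hy]))

theorem prefPartial_zero (A : List Int) :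
    prefPartial A 0 = List.replicate (A.length + 1) 0 := by
  apply List.ext_getElem
  · simp [prefPartial]
  · intro i h1 h2
    simp only [prefPartial, List.getElem_map, List.getElem_range, List.getElem_replicate,
      Nat.le_zero]
    split
    · rename_i h; subst h; simp
    · rfl

theorem sum_take_succ (A : List Int) (j : Nat) (hj : j < A.length) :
    (A.take (j + 1)).sum = (A.take j).sum + A[j] := by
  rw [List.take_add_one]
  simp [hj]

theorem prefPartial_step (A : List Int) (j : Nat) (hj : j < A.length) :
    PySem.List.pySetD (prefPartial A j) ((j : Int) + 1)
      (PySem.List.pyGetD (prefPartial A j) ((j : Int) + 1 - 1) 0 +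
       PySem.List.pyGetD A ((j : Int) + 1 - 1) 0) = prefPartial A (j + 1) := by
  have h1 : ((j : Int) + 1 - 1) = ((j : Nat) : Int) := by ring
  rw [h1, PySem.List.pyGetD_natCast, PySem.List.pyGetD_natCast]
  have hsetc : ((j : Int) + 1) = (((j + 1 : Nat)) : Int) := by push_cast; ring
  rw [hsetc, PySem.List.pySetD_natCast]
  have hlenP : (prefPartial A j).length = A.length + 1 := by simp [prefPartial]
  have hgP : (prefPartial A j).getD j 0 = (A.take j).sum := by
    rw [List.getD_eq_getElem _ _ (by omega : j < (prefPartial A j).length)]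
    simp [prefPartial]
  have hgA : A.getD j 0 = A[j] := List.getD_eq_getElem _ _ hj
  rw [hgP, hgA]
  apply List.ext_getElem
  · simp [prefPartial]
  · intro i hi hi'
    simp only [prefPartial] at hi ⊢
    rw [List.getElem_set]
    by_cases hij : j + 1 = i
    · subst hij
      simp [sum_take_succ A j hj]
    · simp only [List.getElem_map, List.getElem_range, if_neg hij]
      by_cases h2 : i ≤ j
      · rw [if_pos h2, if_pos (by omega)]
      · rw [if_neg h2, if_neg (by omega)]

theorem prefix_fold (A : List Int) (j : Nat) (hj : j ≤ A.length) :
    (PySem.List.pyRange 1 ((j : Int) + 1) 1).foldl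
      (fun P kk =>
        PySem.List.pySetD P kk (PySem.List.pyGetD P (kk - 1) 0 + PySem.List.pyGetD A (kk - 1) 0))
      (List.replicate (A.length + 1) 0) = prefPartial A j := by
  induction j with
  | zero =>
      rw [PySem.List.pyRange_one_eq_nil (by norm_num)]
      simp [prefPartial_zero]
  | succ j ih =>
      have hrange : PySem.List.pyRange 1 (((j + 1 : Nat) : Int) + 1) 1 =
          PySem.List.pyRange 1 ((j : Int) + 1) 1 ++ [(j : Int) + 1] := by
        have := PySem.List.pyRange_one_succ_right (a := 1) (b := (j : Int) + 1) (by omega)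
        push_cast
        push_cast at this
        rw [this]
      rw [hrange, List.foldl_append, ih (by omega)]
      simp only [List.foldl_cons, List.foldl_nil]
      exact prefPartial_step A j (by omega)

theorem prefixSumsA_eq (A : List Int) : prefixSumsA A = prefPartial A A.length := by
  unfold prefixSumsA
  exact prefix_fold A A.length le_rfl

theorem pref_get (A : List Int) (i : Int) (h0 : 0 ≤ i) (h1 : i ≤ (A.length : Int)) :
    PySem.List.pyGetD (prefixSumsA A) i 0 = (A.take i.toNat).sum := by
  rw [prefixSumsA_eq]
  obtain ⟨j, rfl⟩ : ∃ j : Nat, i = (j : Int) := ⟨i.toNat, by omega⟩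
  rw [PySem.List.pyGetD_natCast]
  have hj : j ≤ A.length := by exact_mod_cast h1
  rw [List.getD_eq_getElem _ _ (by simp [prefPartial]; omega)]
  simp [prefPartial, hj]

theorem slice_sum (A : List Int) (l r : Int) (h0 : 0 ≤ l) (hlr : l ≤ r) (_hr : r ≤ (A.length : Int)) :
    (PySem.List.slice A (some l) (some r)).sum = (A.take r.toNat).sum - (A.take l.toNat).sum := by
  rw [PySem.List.slice_toNat A (a := l) (b := r) (by omega) (by omega)]
  have h : r.toNat = l.toNat + (r.toNat - l.toNat) := by omega
  have htake : A.take r.toNat = A.take l.toNat ++ (A.drop l.toNat).take (r.toNat - l.toNat) := by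
    rw [h, List.take_add]
    congr 2
    omega
  rw [htake, List.sum_append]
  ring

-- proof that each loop body agrees pointwise (under Pre_) and hence the folds agree
theorem solution_eq (A : List Int) (k m : Int) (hpre : Pre_solution A k m) :
    solution A k m = solution_alt A k m := by
  unfold solution solution_alt
  rcases hpre with ⟨hk0, hkn⟩ | hm
  · -- 0 ≤ k ≤ n : both loop bodies compute the same window sum
    have hcongr1 :
        ∀ (result p : Int), p ∈ PySem.List.pyRange 0 (min m k + 1) 1 →
          max result (PySem.List.pyGetD (prefixSumsA A) (min (A.length : Int) (max k (k + m - 2 * p))) 0 -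
                      PySem.List.pyGetD (prefixSumsA A) (k - p) 0)
          = max result (PySem.List.slice A (some (k - p)) (some (min (A.length : Int) (max k (k + m - 2 * p))))).sum := by
      intro result p hp
      rw [PySem.List.mem_pyRange_one] at hp
      have hl0 : 0 ≤ k - p := by omega
      have hr : min (A.length : Int) (max k (k + m - 2 * p)) ≤ (A.length : Int) := by omega
      have hlr : k - p ≤ min (A.length : Int) (max k (k + m - 2 * p)) := by omega
      rw [pref_get A _ (by omega) hr, pref_get A _ hl0 (by omega),
          slice_sum A _ _ hl0 hlr hr]
    have hcongr2 :
        ∀ (result p : Int), p ∈ PySem.List.pyRange 0 (min (m + 1) ((A.length : Int) - k)) 1 →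
          max result (PySem.List.pyGetD (prefixSumsA A) (k + p) 0 -
                      PySem.List.pyGetD (prefixSumsA A) (max 0 (min k (k - (m - 2 * p)))) 0)
          = max result (PySem.List.slice A (some (max 0 (min k (k - (m - 2 * p))))) (some (k + p))).sum := by
      intro result p hp
      rw [PySem.List.mem_pyRange_one] at hp
      have hl0 : (0 : Int) ≤ max 0 (min k (k - (m - 2 * p))) := by omega
      have hr : k + p ≤ (A.length : Int) := by omega
      have hlr : max 0 (min k (k - (m - 2 * p))) ≤ k + p := by omega
      rw [pref_get A _ (by omega) hr, pref_get A _ hl0 (by omega),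
          slice_sum A _ _ hl0 hlr hr]
    rw [foldl_congr_mem' hcongr1, foldl_congr_mem' hcongr2]
  · -- m < 0 : both loops are empty in both programs
    rw [PySem.List.pyRange_one_eq_nil (a := 0) (b := min m k + 1) (by omega),
        PySem.List.pyRange_one_eq_nil (a := 0) (b := min (m + 1) ((A.length : Int) - k)) (by omega)]
    simp

-- ===== VERDICT (by name: the statement is the Claim_ definition above) =====
theorem solution_spec : Claim_equal_solution := by
  intro A k m _ hpre
  unfold Spec_solution
  exact solution_eq A k m hpre
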